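-- pv_equiv track=rewrite | github.com/SimonCoulombe/SimonBot | opponent_bots/agent_smith/offsets.py | calculate
-- ===== SOURCE A (Python) =====
-- import math
--
-- def calculate( radius2 ):
--
-- 	offsets = []
-- 	mx = int( math.sqrt( radius2 ))
-- 	for d_row in range( -mx, mx + 1 ):
-- 		for d_col in range( -mx, mx + 1 ):
-- 			d2 = d_row ** 2 + d_col ** 2
-- 			#print d_row, d_col
-- 			if d2 <= radius2:
-- 				offsets.append((
-- 					# Create all negative offsets so vision will
-- 					# wrap around the edges properly
-- 					#( d_row % map_rows ) - map_rows,
-- 					#( d_col % map_cols ) - map_cols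
-- 					d_row, d_col
-- 				))
-- 	return offsets
-- ===== SOURCE B (Python) =====
-- import math
--
-- def calculate(radius2):
--     mx = math.isqrt(radius2)
--     half = [math.isqrt(radius2 - r * r) for r in range(mx + 1)]
--     extents = list(reversed(half[1:])) + half
--     return [(row - mx, col - m)
--             for row, m in enumerate(extents)
--             for col in range(2 * m + 1)]
-- ===== Notes on version B (the rewrite author's own statement) =====
-- stated objective: alternative
-- what changed: B computes the half-row extents [isqrt(radius2-r*r) for r in 0..mx] once, mirrors them by symmetry into a full extent table, and emits the disk with enumerate + offset arithmetic (row-mx, col-m) over range(2m+1); A scans the full bounding square and tests d_row**2+d_col**2<=radius2 at every point.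
import Mathlib
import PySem

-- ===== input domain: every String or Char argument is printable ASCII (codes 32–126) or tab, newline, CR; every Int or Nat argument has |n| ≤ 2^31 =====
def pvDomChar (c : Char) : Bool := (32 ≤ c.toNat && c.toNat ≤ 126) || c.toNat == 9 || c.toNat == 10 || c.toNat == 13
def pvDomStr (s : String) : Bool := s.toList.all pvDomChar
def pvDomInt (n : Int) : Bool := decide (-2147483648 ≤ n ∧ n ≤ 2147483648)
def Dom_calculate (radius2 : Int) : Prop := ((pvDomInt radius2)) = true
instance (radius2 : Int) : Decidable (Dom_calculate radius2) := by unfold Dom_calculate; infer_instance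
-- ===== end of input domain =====

-- B mirrors half-row extents computed by symmetry and emits the disk via enumerate +
-- offset arithmetic, instead of A's full bounding-square scan with a per-point test (objective: alternative).


-- ===== PORT A =====
-- int(math.sqrt(radius2)) : exact equal to Int.sqrt for 0 ≤ radius2 ≤ 2^31 (double sqrt is
-- correctly rounded and the gap to the nearest square exceeds the rounding error at this size).
def calculate (radius2 : Int) : List (Int × Int) :=
  let mx : Int := Int.sqrt radius2
  (PySem.List.pyRange (-mx) (mx + 1) 1).foldl (fun offsets d_row =>
    (PySem.List.pyRange (-mx) (mx + 1) 1).foldl (fun offsets d_col =>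
      let d2 := d_row ^ 2 + d_col ^ 2
      if d2 ≤ radius2 then offsets ++ [(d_row, d_col)] else offsets) offsets) []

-- ===== PORT B =====
-- math.isqrt = Int.sqrt (exact integer square root)
def calculate_alt (radius2 : Int) : List (Int × Int) :=
  let mx : Int := Int.sqrt radius2
  let half := (PySem.List.pyRange 0 (mx + 1) 1).map (fun r => Int.sqrt (radius2 - r * r))
  let extents := (PySem.List.slice half (some 1) none).reverse ++ half
  (PySem.List.enumerate extents 0).flatMap (fun p =>
    (PySem.List.pyRange 0 (2 * p.2 + 1) 1).map (fun col => (p.1 - mx, col - p.2)))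

-- ===== PRECONDITION & SPEC =====
-- Pre_ excludes negative radius2, on which A raises ValueError (math domain error); B raises there too.
def Pre_calculate (radius2 : Int) : Prop := 0 ≤ radius2
instance (radius2 : Int) : Decidable (Pre_calculate radius2) := by unfold Pre_calculate; infer_instance
def pvWitness_calculate : Int := (2)

def Spec_calculate (radius2 : Int) (out : List (Int × Int)) : Prop := out = calculate_alt radius2
instance (radius2 : Int) (out : List (Int × Int)) : Decidable (Spec_calculate radius2 out) := by unfold Spec_calculate; infer_instance

-- ===== CLAIM (what is proved, stated in full; the proofs are below) =====
def Claim_equal_calculate : Prop := ∀ (radius2 : Int), Dom_calculate radius2 → Pre_calculate radius2 → Spec_calculate radius2 (calculate radius2)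

-- ===== LEMMAS AND PROOFS =====

-- filtering an integer range by an interval predicate yields the subrange
lemma pv_filter_pyRange (lo hi : Int) (p : Int → Bool)
    (hp : ∀ x, p x = decide (lo ≤ x ∧ x ≤ hi)) :
    ∀ (n : Nat) (a b : Int), (b - a).toNat = n → hi + 1 ≤ b →
    (PySem.List.pyRange a b 1).filter p = PySem.List.pyRange (max a lo) (hi + 1) 1 := by
  intro n
  induction n with
  | zero =>
    intro a b hn hb
    have h1 : PySem.List.pyRange a b 1 = [] := by
      simp [PySem.List.pyRange]; omega
    have h2 : PySem.List.pyRange (max a lo) (hi + 1) 1 = [] := by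
      simp [PySem.List.pyRange]; omega
    simp [h1, h2]
  | succ n ih =>
    intro a b hn hb
    have hab : a < b := by omega
    rw [PySem.List.pyRange_one_cons hab, List.filter_cons]
    have ih' := ih (a + 1) b (by omega) hb
    by_cases hcase : lo ≤ a ∧ a ≤ hi
    · have hpa : p a = true := by rw [hp]; simp [hcase]
      rw [hpa]
      simp only [ih']
      have hmax : max a lo = a := by omega
      have hmax' : max (a + 1) lo = a + 1 := by omega
      rw [hmax, hmax', PySem.List.pyRange_one_cons (by omega : a < hi + 1)]
      simp
    · have hpa : p a = false := by rw [hp]; simp; omega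
      rw [hpa]
      simp only [ih', Bool.false_eq_true, if_false]
      rcases (by omega : a < lo ∨ hi < a) with h | h
      · have hm : max a lo = max (a + 1) lo := by omega
        rw [hm]
      · have h1 : PySem.List.pyRange (max (a + 1) lo) (hi + 1) 1 = [] := by
          simp [PySem.List.pyRange]; omega
        have h2 : PySem.List.pyRange (max a lo) (hi + 1) 1 = [] := by
          simp [PySem.List.pyRange]; omega
        rw [h1, h2]

-- |c| ≤ Int.sqrt R  ↔  c² ≤ R   (for 0 ≤ R)
lemma pv_sq_le_iff (c R : Int) (hR : 0 ≤ R) :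
    (-(Int.sqrt R) ≤ c ∧ c ≤ Int.sqrt R) ↔ c ^ 2 ≤ R := by
  set s := Int.sqrt R with hs
  set m := c.natAbs * c.natAbs with hm
  have hsq : c ^ 2 = ((m : Nat) : Int) := by
    rw [hm]; push_cast [Int.natAbs_mul_self]; rw [← sq_abs]; ring
  rw [hsq]
  constructor
  · intro ⟨ha, hb⟩
    have habs : (c.natAbs : Int) ≤ s := by
      rcases Int.natAbs_eq c with h | h <;> omega
    have habs' : c.natAbs ≤ Nat.sqrt R.toNat := by
      rw [hs] at habs; unfold Int.sqrt at habs; exact_mod_cast habs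
    have h3 : m ≤ R.toNat := by rw [hm]; exact Nat.le_sqrt.mp habs'
    omega
  · intro h
    have h3 : m ≤ R.toNat := by omega
    have habs : c.natAbs ≤ Nat.sqrt R.toNat := Nat.le_sqrt.mpr (by rw [hm] at h3; exact h3)
    have habs' : (c.natAbs : Int) ≤ s := by
      rw [hs]; unfold Int.sqrt; exact_mod_cast habs
    rcases Int.natAbs_eq c with hc | hc <;> omega

lemma pv_sqrt_le_sqrt {a b : Int} (h : a ≤ b) : Int.sqrt a ≤ Int.sqrt b := by
  unfold Int.sqrt
  exact_mod_cast Nat.sqrt_le_sqrt (by omega : a.toNat ≤ b.toNat)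

lemma pv_sqrt_nonneg (a : Int) : 0 ≤ Int.sqrt a := by
  unfold Int.sqrt; exact Int.natCast_nonneg _

-- shift: range starting at s is the 0-based range translated by s
lemma pv_range_shift (s n : Int) :
    PySem.List.pyRange s (s + n) 1 = (PySem.List.pyRange 0 n 1).map (fun k => k + s) := by
  rw [PySem.List.pyRange_one, PySem.List.pyRange_one, List.map_map]
  have : (s + n - s).toNat = (n - 0).toNat := by omega
  rw [this]
  apply List.map_congr_left
  intro k _
  simp; omega

-- the canonical row form both ports reduce to
def pvCanon (radius2 : Int) : List (Int × Int) :=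
  (PySem.List.pyRange (-(Int.sqrt radius2)) (Int.sqrt radius2 + 1) 1).flatMap (fun r =>
    (PySem.List.pyRange (-(Int.sqrt (radius2 - r * r))) (Int.sqrt (radius2 - r * r) + 1) 1).map
      (fun c => (r, c)))

lemma pv_a_eq_canon (radius2 : Int) (hpre : 0 ≤ radius2) :
    calculate radius2 = pvCanon radius2 := by
  unfold calculate pvCanon
  simp only []
  set mx := Int.sqrt radius2 with hmx
  have hstep : ∀ acc (r : Int), r ∈ PySem.List.pyRange (-mx) (mx + 1) 1 →
      ((PySem.List.pyRange (-mx) (mx + 1) 1).foldl (fun offsets d_col =>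
        if r ^ 2 + d_col ^ 2 ≤ radius2 then offsets ++ [(r, d_col)] else offsets) acc)
      = acc ++ (PySem.List.pyRange (-(Int.sqrt (radius2 - r * r))) (Int.sqrt (radius2 - r * r) + 1) 1).map (fun c => (r, c)) := by
    intro acc r hr
    rw [PySem.List.mem_pyRange_one] at hr
    set mc := Int.sqrt (radius2 - r * r) with hmc
    have hr2 : r ^ 2 ≤ radius2 := (pv_sq_le_iff r radius2 hpre).mp ⟨by omega, by omega⟩
    have hrr : radius2 - r * r = radius2 - r ^ 2 := by ring
    have hRnn : 0 ≤ radius2 - r * r := by rw [hrr]; linarith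
    have hmc_le : mc ≤ mx := by
      rw [hmc, hmx]; exact pv_sqrt_le_sqrt (by linarith [sq_nonneg r])
    have hmc_nn : 0 ≤ mc := by rw [hmc]; exact pv_sqrt_nonneg _
    have hA := PySem.List.foldl_append_if (fun c => decide (r ^ 2 + c ^ 2 ≤ radius2))
        (fun c => (r, c)) (PySem.List.pyRange (-mx) (mx + 1) 1) acc
    simp only [decide_eq_true_eq] at hA
    rw [hA]
    congr 1
    have key : ∀ x : Int, (r ^ 2 + x ^ 2 ≤ radius2 ↔ -mc ≤ x ∧ x ≤ mc) := by
      intro x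
      rw [hmc, hrr, pv_sq_le_iff x _ (by rw [← hrr]; exact hRnn)]
      constructor <;> intro h <;> linarith
    have hfilt := pv_filter_pyRange (-mc) mc (fun c => decide (r ^ 2 + c ^ 2 ≤ radius2))
        (by intro x; simp only [decide_eq_decide]; rw [key x])
        ((mx + 1) - (-mx)).toNat (-mx) (mx + 1) rfl (by omega)
    rw [hfilt]
    have hm : max (-mx) (-mc) = -mc := by omega
    rw [hm]
  have hfold : (PySem.List.pyRange (-mx) (mx + 1) 1).foldl (fun offsets d_row =>
        (PySem.List.pyRange (-mx) (mx + 1) 1).foldl (fun offsets d_col =>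
          if d_row ^ 2 + d_col ^ 2 ≤ radius2 then offsets ++ [(d_row, d_col)] else offsets) offsets) []
      = (PySem.List.pyRange (-mx) (mx + 1) 1).foldl (fun acc r =>
        acc ++ (PySem.List.pyRange (-(Int.sqrt (radius2 - r * r))) (Int.sqrt (radius2 - r * r) + 1) 1).map (fun c => (r, c))) [] :=
    by exact PySem.List.foldl_congr_mem _ _ _ _ hstep
  rw [hfold, PySem.List.foldl_append_eq_flatMap]
  simp

-- enumerate of a mapped range, flattened, is a flatMap over the range itself
lemma pv_enum_flatMap {β : Type} (e : Int → Int) (F : Int × Int → List β) :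
    ∀ (n : Nat) (a b s : Int), (b - a).toNat = n →
    (PySem.List.enumerate ((PySem.List.pyRange a b 1).map e) s).flatMap F
    = (PySem.List.pyRange a b 1).flatMap (fun r => F (s + (r - a), e r)) := by
  intro n
  induction n with
  | zero =>
    intro a b s hn
    rw [PySem.List.pyRange_one_eq_nil (by omega)]
    simp [PySem.List.enumerate_nil]
  | succ n ih =>
    intro a b s hn
    rw [PySem.List.pyRange_one_cons (by omega : a < b), List.map_cons,
        PySem.List.enumerate_cons, List.flatMap_cons, List.flatMap_cons,
        ih (a + 1) b (s + 1) (by omega)]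
    have hhead : (s, e a) = (s + (a - a), e a) := by congr 1; ring
    rw [← hhead]
    have hfg : (fun r => F (s + 1 + (r - (a + 1)), e r)) = (fun r => F (s + (r - a), e r)) := by
      funext r
      have harg : (s + 1 + (r - (a + 1)), e r) = (s + (r - a), e r) := by congr 1; ring
      rw [harg]
    rw [hfg]

lemma pv_b_eq_canon (radius2 : Int) :
    calculate_alt radius2 = pvCanon radius2 := by
  unfold calculate_alt pvCanon
  simp only []
  set mx := Int.sqrt radius2 with hmx
  have hmx_nn : 0 ≤ mx := by rw [hmx]; exact pv_sqrt_nonneg _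
  set e : Int → Int := fun r => Int.sqrt (radius2 - r * r) with he
  have he_even : ∀ r : Int, e (-r) = e r := by
    intro r; rw [he]; simp only []; congr 1; ring
  -- half = map e over [0..mx]
  have hhalf : (PySem.List.pyRange 0 (mx + 1) 1).map (fun r => Int.sqrt (radius2 - r * r))
      = (PySem.List.pyRange 0 (mx + 1) 1).map e := rfl
  -- extents = map e over [-mx..mx]
  have hext : (PySem.List.slice ((PySem.List.pyRange 0 (mx + 1) 1).map e) (some 1) none).reverse
        ++ (PySem.List.pyRange 0 (mx + 1) 1).map e
      = (PySem.List.pyRange (-mx) (mx + 1) 1).map e := by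
    rw [PySem.List.slice_from_one]
    have hcons : PySem.List.pyRange 0 (mx + 1) 1 = 0 :: PySem.List.pyRange 1 (mx + 1) 1 :=
      PySem.List.pyRange_one_cons (by omega)
    have htail : (((PySem.List.pyRange 0 (mx + 1) 1).map e).tail)
        = (PySem.List.pyRange 1 (mx + 1) 1).map e := by
      rw [hcons]; simp
    rw [htail, ← List.map_reverse]
    have hrev : (PySem.List.pyRange 1 (mx + 1) 1).reverse = PySem.List.pyRange mx 0 (-1) := by
      rw [PySem.List.pyRange_neg_one_eq_reverse]
      norm_num
    rw [hrev]
    have hsplit : PySem.List.pyRange (-mx) (mx + 1) 1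
        = PySem.List.pyRange (-mx) 0 1 ++ PySem.List.pyRange 0 (mx + 1) 1 :=
      PySem.List.pyRange_one_append _ _ _ (by omega) (by omega)
    rw [hsplit, List.map_append]
    congr 1
    rw [PySem.List.pyRange_neg_one, PySem.List.pyRange_one, List.map_map, List.map_map]
    have hlen : (mx - 0).toNat = (0 - -mx).toNat := by omega
    rw [hlen]
    apply List.map_congr_left
    intro k _
    simp only [Function.comp]
    have : mx - (k : Int) = -(-mx + k) := by omega
    rw [this, he_even]
  rw [hhalf, hext]
  rw [pv_enum_flatMap e _ ((mx + 1 - -mx).toNat) (-mx) (mx + 1) 0 rfl]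
  congr 1
  funext r
  simp only []
  have h1 : (0 : Int) + (r - -mx) - mx = r := by ring
  have h2 : -(e r) + (2 * e r + 1) = e r + 1 := by ring
  rw [← h2, pv_range_shift (-(e r)) (2 * e r + 1), List.map_map]
  apply List.map_congr_left
  intro k _
  simp only [Function.comp]
  congr 1

-- ===== VERDICT (by name: the statement is the Claim_ definition above) =====
theorem calculate_spec : Claim_equal_calculate := by
  intro radius2 _ hpre
  unfold Spec_calculate
  rw [pv_a_eq_canon radius2 hpre, pv_b_eq_canon radius2]
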